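-- pv_equiv track=rewrite | github.com/youyouxiangwang-prog/CapsoulAI | app/services/moment_service.py | _categorize_conversations_by_keywords
-- ===== SOURCE A (Python) =====
-- from typing import List, Optional, Dict, Any
--
-- def _categorize_conversations_by_keywords(conversation_data: List[Dict]) -> Dict[str, int]:
--     """Fallback categorization using keyword matching"""
--     categories = {'Work': 0, 'Family': 0, 'Learning': 0, 'Personal': 0}
--
--     for conv in conversation_data:
--         content = f"{conv.get('title', '')} {conv.get('topics', '')} {conv.get('summary', '')} {conv.get('content_sample', '')}".lower()
--
--         if any(keyword in content for keyword in ['work', 'project', 'meeting', 'business', 'client', 'team', 'office', 'job', 'company']):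
--             categories['Work'] += 1
--         elif any(keyword in content for keyword in ['family', 'child', 'parent', 'home', 'dinner', 'weekend', 'mom', 'dad', 'kids', 'spouse']):
--             categories['Family'] += 1
--         elif any(keyword in content for keyword in ['learn', 'study', 'course', 'education', 'book', 'knowledge', 'school', 'university', 'training']):
--             categories['Learning'] += 1
--         else:
--             categories['Personal'] += 1
--
--     return categories
-- ===== SOURCE B (Python) =====
-- from typing import List, Dict
--
-- _CATEGORY_TABLE = [
--     ('Work', ['work', 'project', 'meeting', 'business', 'client', 'team', 'office', 'job', 'company']),
--     ('Family', ['family', 'child', 'parent', 'home', 'dinner', 'weekend', 'mom', 'dad', 'kids', 'spouse']),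
--     ('Learning', ['learn', 'study', 'course', 'education', 'book', 'knowledge', 'school', 'university', 'training']),
-- ]
--
-- def _categorize_conversations_by_keywords(conversation_data: List[Dict]) -> Dict[str, int]:
--     """Partition cascade: stage-by-stage, each category filters out its matches
--     from the pool; whatever survives every stage is 'Personal'."""
--     remaining = [
--         f"{conv.get('title', '')} {conv.get('topics', '')} {conv.get('summary', '')} {conv.get('content_sample', '')}".lower()
--         for conv in conversation_data
--     ]
--     counts = {}
--     for name, keywords in _CATEGORY_TABLE:
--         before = len(remaining)
--         remaining = [c for c in remaining if not any(k in c for k in keywords)]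
--         counts[name] = before - len(remaining)
--     counts['Personal'] = len(remaining)
--     return counts
-- ===== Notes on version B (the rewrite author's own statement) =====
-- stated objective: alternative
-- what changed: Replaces the per-conversation if/elif branch chain with a staged partition cascade: all content strings are built once, then each category in turn filters its matches out of the remaining pool and counts them by the length drop, with 'Personal' being whatever survives every stage.
import Mathlib
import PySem

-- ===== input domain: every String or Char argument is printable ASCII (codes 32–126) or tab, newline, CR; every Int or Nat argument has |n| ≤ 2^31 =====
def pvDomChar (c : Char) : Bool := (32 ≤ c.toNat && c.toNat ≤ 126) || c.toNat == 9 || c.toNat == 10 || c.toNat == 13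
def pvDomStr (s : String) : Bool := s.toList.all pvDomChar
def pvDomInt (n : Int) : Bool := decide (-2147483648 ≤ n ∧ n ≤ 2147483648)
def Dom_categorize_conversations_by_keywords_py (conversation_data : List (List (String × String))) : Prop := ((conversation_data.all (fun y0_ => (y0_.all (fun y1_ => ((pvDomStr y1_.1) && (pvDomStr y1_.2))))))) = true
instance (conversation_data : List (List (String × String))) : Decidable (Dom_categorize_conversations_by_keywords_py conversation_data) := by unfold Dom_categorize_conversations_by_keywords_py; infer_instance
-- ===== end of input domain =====

-- B replaces A's per-conversation if/elif branch chain by a staged partition cascade: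
-- contents built once, each category filters its matches out of the pool and counts the
-- length drop; 'Personal' is the surviving pool (alternative decomposition; same cost).


-- ===== PORT A =====
-- content string: f"{conv.get('title','')} {conv.get('topics','')} {conv.get('summary','')} {conv.get('content_sample','')}".lower()
def pvContentA (conv : List (String × String)) : String :=
  let d : PySem.Dict String String := PySem.Dict.mk conv
  PySem.Str.lower (d.getD "title" "" ++ " " ++ d.getD "topics" "" ++ " " ++
                   d.getD "summary" "" ++ " " ++ d.getD "content_sample" "")

def categorize_conversations_by_keywords_py (conversation_data : List (List (String × String))) : List (String × Int) :=
  let categories : PySem.Dict String Int :=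
    PySem.Dict.ofList [("Work", 0), ("Family", 0), ("Learning", 0), ("Personal", 0)]
  let final := conversation_data.foldl (fun categories conv =>
    if ["work", "project", "meeting", "business", "client", "team", "office", "job", "company"].any
         (fun keyword => PySem.Str.isIn keyword (pvContentA conv)) then
      categories.insert "Work" (categories.getD "Work" 0 + 1)
    else if ["family", "child", "parent", "home", "dinner", "weekend", "mom", "dad", "kids", "spouse"].any
         (fun keyword => PySem.Str.isIn keyword (pvContentA conv)) then
      categories.insert "Family" (categories.getD "Family" 0 + 1)
    else if ["learn", "study", "course", "education", "book", "knowledge", "school", "university", "training"].any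
         (fun keyword => PySem.Str.isIn keyword (pvContentA conv)) then
      categories.insert "Learning" (categories.getD "Learning" 0 + 1)
    else
      categories.insert "Personal" (categories.getD "Personal" 0 + 1)) categories
  final.items

-- ===== PORT B =====
def pvCategoryTable : List (String × List String) :=
  [("Work", ["work", "project", "meeting", "business", "client", "team", "office", "job", "company"]),
   ("Family", ["family", "child", "parent", "home", "dinner", "weekend", "mom", "dad", "kids", "spouse"]),
   ("Learning", ["learn", "study", "course", "education", "book", "knowledge", "school", "university", "training"])]

def pvContentB (conv : List (String × String)) : String :=
  let d : PySem.Dict String String := PySem.Dict.mk conv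
  PySem.Str.lower (d.getD "title" "" ++ " " ++ d.getD "topics" "" ++ " " ++
                   d.getD "summary" "" ++ " " ++ d.getD "content_sample" "")

-- one stage of the cascade: filter out this category's matches, record the length drop
def pvStage (acc : List (String × Int) × List String) (entry : String × List String) :
    List (String × Int) × List String :=
  let before := acc.2.length
  let remaining := acc.2.filter (fun c => !(entry.2.any (fun k => PySem.Str.isIn k c)))
  (acc.1 ++ [(entry.1, (before : Int) - (remaining.length : Int))], remaining)

def categorize_conversations_by_keywords_py_alt (conversation_data : List (List (String × String))) : List (String × Int) :=
  let remaining := conversation_data.map pvContentB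
  let r := pvCategoryTable.foldl pvStage ([], remaining)
  r.1 ++ [("Personal", (r.2.length : Int))]

-- ===== PRECONDITION & SPEC =====
def Spec_categorize_conversations_by_keywords_py (conversation_data : List (List (String × String))) (out : List (String × Int)) : Prop := out = categorize_conversations_by_keywords_py_alt conversation_data
instance (conversation_data : List (List (String × String))) (out : List (String × Int)) : Decidable (Spec_categorize_conversations_by_keywords_py conversation_data out) := by unfold Spec_categorize_conversations_by_keywords_py; infer_instance

-- ===== CLAIM (what is proved, stated in full; the proofs are below) =====
def Claim_equal_categorize_conversations_by_keywords_py : Prop := ∀ (conversation_data : List (List (String × String))), Dom_categorize_conversations_by_keywords_py conversation_data → Spec_categorize_conversations_by_keywords_py conversation_data (categorize_conversations_by_keywords_py conversation_data)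

-- ===== LEMMAS AND PROOFS =====

-- match predicates on a content string (the three keyword tests)
def pvW (c : String) : Bool :=
  ["work", "project", "meeting", "business", "client", "team", "office", "job", "company"].any
    (fun k => PySem.Str.isIn k c)
def pvF (c : String) : Bool :=
  ["family", "child", "parent", "home", "dinner", "weekend", "mom", "dad", "kids", "spouse"].any
    (fun k => PySem.Str.isIn k c)
def pvL (c : String) : Bool :=
  ["learn", "study", "course", "education", "book", "knowledge", "school", "university", "training"].any
    (fun k => PySem.Str.isIn k c)

-- the loop body of port A, as a named function (definitionally the foldl body of the port)
def pvStepA (categories : PySem.Dict String Int) (conv : List (String × String)) : PySem.Dict String Int :=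
  if pvW (pvContentA conv) then
    categories.insert "Work" (categories.getD "Work" 0 + 1)
  else if pvF (pvContentA conv) then
    categories.insert "Family" (categories.getD "Family" 0 + 1)
  else if pvL (pvContentA conv) then
    categories.insert "Learning" (categories.getD "Learning" 0 + 1)
  else
    categories.insert "Personal" (categories.getD "Personal" 0 + 1)

def pvMkD (w f l p : Int) : PySem.Dict String Int :=
  PySem.Dict.mk [("Work", w), ("Family", f), ("Learning", l), ("Personal", p)]

-- A's fold, characterised: the items are the four counts of the cascade predicates
theorem pvFold_mk (data : List (List (String × String))) (w f l p : Int) :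
    (data.foldl pvStepA (pvMkD w f l p)).items =
      [("Work", w + (((data.map pvContentA).countP pvW : Nat) : Int)),
       ("Family", f + (((data.map pvContentA).countP (fun c => !pvW c && pvF c) : Nat) : Int)),
       ("Learning", l + (((data.map pvContentA).countP (fun c => !pvW c && !pvF c && pvL c) : Nat) : Int)),
       ("Personal", p + (((data.map pvContentA).countP (fun c => !pvW c && !pvF c && !pvL c) : Nat) : Int))] := by
  induction data generalizing w f l p with
  | nil => simp [pvMkD]
  | cons hd tl ih =>
    rw [List.foldl_cons]
    cases h1 : pvW (pvContentA hd) with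
    | true =>
      have : pvStepA (pvMkD w f l p) hd = pvMkD (w + 1) f l p := by
        simp [pvStepA, h1]; rfl
      rw [this, ih]; simp [h1]; ring
    | false =>
      cases h2 : pvF (pvContentA hd) with
      | true =>
        have : pvStepA (pvMkD w f l p) hd = pvMkD w (f + 1) l p := by
          simp [pvStepA, h1, h2]; rfl
        rw [this, ih]; simp [h1, h2]; ring
      | false =>
        cases h3 : pvL (pvContentA hd) with
        | true =>
          have : pvStepA (pvMkD w f l p) hd = pvMkD w f (l + 1) p := by
            simp [pvStepA, h1, h2, h3]; rfl
          rw [this, ih]; simp [h1, h2, h3]; ring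
        | false =>
          have : pvStepA (pvMkD w f l p) hd = pvMkD w f l (p + 1) := by
            simp [pvStepA, h1, h2, h3]; rfl
          rw [this, ih]; simp [h1, h2, h3]; ring

-- B's cascade, unfolded over the literal three-entry table
theorem pvAlt_eq (data : List (List (String × String))) :
    categorize_conversations_by_keywords_py_alt data =
      let cs := data.map pvContentB
      let r1 := cs.filter (fun c => !pvW c)
      let r2 := r1.filter (fun c => !pvF c)
      let r3 := r2.filter (fun c => !pvL c)
      [("Work", (cs.length : Int) - (r1.length : Int)),
       ("Family", (r1.length : Int) - (r2.length : Int)),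
       ("Learning", (r2.length : Int) - (r3.length : Int)),
       ("Personal", (r3.length : Int))] := by
  simp only [categorize_conversations_by_keywords_py_alt, pvCategoryTable, List.foldl_cons,
    List.foldl_nil, pvStage, pvW, pvF, pvL]
  rfl

-- length of a filtered list as length minus countP of the complement
theorem pvLen_filter_not {α : Type} (p : α → Bool) (xs : List α) :
    ((xs.filter (fun x => !p x)).length : Int) = (xs.length : Int) - (xs.countP p : Nat) := by
  induction xs with
  | nil => simp
  | cons hd tl ih =>
    rw [List.filter_cons, List.countP_cons]
    cases p hd <;> simp <;> omega

-- ===== VERDICT (by name: the statement is the Claim_ definition above) =====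
theorem categorize_conversations_by_keywords_py_spec : Claim_equal_categorize_conversations_by_keywords_py := by
  intro data _
  show _ = _
  have hA : categorize_conversations_by_keywords_py data = (data.foldl pvStepA (pvMkD 0 0 0 0)).items := rfl
  have hcc : data.map pvContentB = data.map pvContentA := rfl
  rw [hA, pvFold_mk, pvAlt_eq]
  simp only [hcc]
  set cs := data.map pvContentA with hcs
  have e1 := pvLen_filter_not pvW cs
  have e2 := pvLen_filter_not pvF (cs.filter (fun c => !pvW c))
  have e3 := pvLen_filter_not pvL ((cs.filter (fun c => !pvW c)).filter (fun c => !pvF c))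
  have c2 : (cs.filter (fun c => !pvW c)).countP pvF = cs.countP (fun c => !pvW c && pvF c) := by
    rw [List.countP_filter]
    congr 1; funext c; cases pvW c <;> cases pvF c <;> rfl
  have c3 : ((cs.filter (fun c => !pvW c)).filter (fun c => !pvF c)).countP pvL
      = cs.countP (fun c => !pvW c && !pvF c && pvL c) := by
    rw [List.countP_filter, List.countP_filter]
    congr 1; funext c; cases pvW c <;> cases pvF c <;> cases pvL c <;> rfl
  have c4 : ((cs.filter (fun c => !pvW c)).filter (fun c => !pvF c)).countP (fun c => !pvL c)
      = cs.countP (fun c => !pvW c && !pvF c && !pvL c) := by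
    rw [List.countP_filter, List.countP_filter]
    congr 1; funext c; cases pvW c <;> cases pvF c <;> cases pvL c <;> rfl
  have e4 : ((((cs.filter (fun c => !pvW c)).filter (fun c => !pvF c)).filter (fun c => !pvL c)).length : Int)
      = (cs.countP (fun c => !pvW c && !pvF c && !pvL c) : Nat) := by
    have := pvLen_filter_not (fun c => !pvL c) ((cs.filter (fun c => !pvW c)).filter (fun c => !pvF c))
    -- length of the triple filter equals countP of the triple conjunction
    have hlen : (((cs.filter (fun c => !pvW c)).filter (fun c => !pvF c)).filter (fun c => !pvL c)).length
        = ((cs.filter (fun c => !pvW c)).filter (fun c => !pvF c)).countP (fun c => !pvL c) :=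
      List.countP_eq_length_filter.symm
    rw [hlen, c4]
  simp only [List.cons.injEq, Prod.mk.injEq, and_true, true_and]
  refine ⟨?_, ?_, ?_, ?_⟩ <;> omega
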